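-- pv_equiv track=rewrite | github.com/jayanth0075/EvolveED.ai | evolveedu-ai/backend/roadmaps/ai_service.py | _extract_skill_name
-- ===== SOURCE A (Python) =====
-- def _extract_skill_name(line):
--     """Extract skill name from a line of text"""
--     # Simple extraction - look for key terms
--     words = line.split()
--     skill_indicators = ['programming', 'development', 'analysis', 'design', 'management',
--                         'communication', 'leadership', 'technical', 'software', 'data']
--
--     for word in words:
--         if word.lower() in skill_indicators:
--             return word.capitalize()
--
--     # Fallback: return first meaningful word
--     for word in words:
--         if len(word) > 3 and word.isalpha():
--             return word.capitalize()
--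
--     return "General Skill"
-- ===== SOURCE B (Python) =====
-- _INDICATORS = {'programming', 'development', 'analysis', 'design', 'management',
--                'communication', 'leadership', 'technical', 'software', 'data'}
--
--
-- def _extract_skill_name(line):
--     """Extract skill name from a line of text (single pass with latched fallback)"""
--     fallback = None
--     for word in line.split():
--         if word.lower() in _INDICATORS:
--             return word.capitalize()
--         if fallback is None and len(word) > 3 and word.isalpha():
--             fallback = word
--     return fallback.capitalize() if fallback is not None else "General Skill"
-- ===== Notes on version B (the rewrite author's own statement) =====
-- stated objective: alternative
-- what changed: A's two sequential scans over the word list (indicator scan, then fallback scan) are fused into one pass that returns early on an indicator word and latches the first meaningful word as a fallback, with the indicator list replaced by a set.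
import Mathlib
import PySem

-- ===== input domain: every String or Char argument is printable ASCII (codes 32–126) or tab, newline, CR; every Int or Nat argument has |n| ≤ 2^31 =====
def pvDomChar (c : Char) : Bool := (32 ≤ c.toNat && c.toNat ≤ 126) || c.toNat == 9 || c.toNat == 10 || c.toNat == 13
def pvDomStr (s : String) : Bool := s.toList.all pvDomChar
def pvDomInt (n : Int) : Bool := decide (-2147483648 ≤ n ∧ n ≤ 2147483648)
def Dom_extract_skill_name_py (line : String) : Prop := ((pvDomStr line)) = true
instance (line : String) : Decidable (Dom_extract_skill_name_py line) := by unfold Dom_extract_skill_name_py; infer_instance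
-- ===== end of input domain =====

-- B rewrites A's two sequential scans over the words as ONE pass with a latched fallback (objective: alternative decomposition).

-- str.capitalize() — hand-ported (no PySem primitive): first char upper-cased, rest lower-cased; exact on ASCII.
def pyCapitalize (s : String) : String :=
  match s.toList with
  | [] => s
  | c :: cs => String.ofList (PySem.Chars.upperChar c :: PySem.Chars.lower cs)

-- ===== PORT A =====
def skillIndicators : List String :=
  ["programming", "development", "analysis", "design", "management",
   "communication", "leadership", "technical", "software", "data"]

-- first for-loop of A: first word whose lower() is in the indicator list
def findIndicatorA : List String → Option String
  | [] => none
  | w :: ws => if skillIndicators.contains (PySem.Str.lower w) then some (pyCapitalize w) else findIndicatorA ws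

-- second for-loop of A: first meaningful word
def findFallbackA : List String → Option String
  | [] => none
  | w :: ws => if PySem.Str.len w > 3 && PySem.Str.strIsalpha w then some (pyCapitalize w) else findFallbackA ws

def extract_skill_name_py (line : String) : String :=
  let words := PySem.Str.split₀ line
  match findIndicatorA words with
  | some r => r
  | none =>
    match findFallbackA words with
    | some r => r
    | none => "General Skill"

-- ===== PORT B =====
def indicatorSet : PySem.Set String :=
  PySem.Set.ofList
    ["programming", "development", "analysis", "design", "management",
     "communication", "leadership", "technical", "software", "data"]

-- B's single loop: early return on an indicator word, latch the first meaningful word as fallback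
def loopB : List String → Option String → String
  | [], fb =>
    match fb with
    | some w => pyCapitalize w
    | none => "General Skill"
  | w :: ws, fb =>
    if PySem.Set.contains indicatorSet (PySem.Str.lower w) then pyCapitalize w
    else
      loopB ws
        (if fb.isNone && (PySem.Str.len w > 3 && PySem.Str.strIsalpha w) then some w else fb)

def extract_skill_name_py_alt (line : String) : String :=
  loopB (PySem.Str.split₀ line) none

-- ===== PRECONDITION & SPEC =====
def Spec_extract_skill_name_py (line : String) (out : String) : Prop := out = extract_skill_name_py_alt line
instance (line : String) (out : String) : Decidable (Spec_extract_skill_name_py line out) := by unfold Spec_extract_skill_name_py; infer_instance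

-- ===== CLAIM (what is proved, stated in full; the proofs are below) =====
def Claim_equal_extract_skill_name_py : Prop := ∀ (line : String), Dom_extract_skill_name_py line → Spec_extract_skill_name_py line (extract_skill_name_py line)

-- ===== LEMMAS AND PROOFS =====

-- the two indicator membership tests agree
lemma indicatorSet_eq : indicatorSet = skillIndicators := by decide

-- the loop invariant: one fused pass equals A's two scans, with the latched fallback taking
-- priority over the fallback scan but not over the indicator scan
lemma loopB_eq (ws : List String) (fb : Option String) :
    loopB ws fb =
      match findIndicatorA ws with
      | some r => r
      | none =>
        match fb with
        | some w => pyCapitalize w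
        | none =>
          match findFallbackA ws with
          | some r => r
          | none => "General Skill" := by
  induction ws generalizing fb with
  | nil => rfl
  | cons w ws ih =>
    by_cases hc : PySem.Str.lower w ∈ skillIndicators
    · simp [loopB, findIndicatorA, indicatorSet_eq, hc]
    · cases fb with
      | some v => simp [loopB, findIndicatorA, indicatorSet_eq, hc, ih]
      | none =>
        by_cases hm : 3 < w.length ∧ PySem.Chars.strIsalpha w.toList = true
        · simp [loopB, findIndicatorA, findFallbackA, indicatorSet_eq, hc, hm, ih]
        · simp [loopB, findIndicatorA, findFallbackA, indicatorSet_eq, hc, hm, ih]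

-- ===== VERDICT (by name: the statement is the Claim_ definition above) =====
theorem extract_skill_name_py_spec : Claim_equal_extract_skill_name_py := by
  intro line _
  unfold Spec_extract_skill_name_py extract_skill_name_py extract_skill_name_py_alt
  rw [loopB_eq]
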